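-- pv_equiv track=rewrite | github.com/Tsarcasm831/Temp | py/anime_clean.py | remove_infobox_jutsu
-- ===== SOURCE A (Python) =====
-- def remove_infobox_jutsu(text: str) -> str:
--     """Remove the full '{{Infobox/Jutsu ...}}' template with balanced braces.
--     Case-insensitive match on the template name.
--     """
--     # Find start (case-insensitive)
--     needle = "{{Infobox/Jutsu"
--     lower = text.lower()
--     start = lower.find(needle.lower())
--     if start == -1:
--         return text
--     i = start
--     depth = 0
--     n = len(text)
--     while i < n - 1:
--         # Handle opening '{{' and closing '}}'
--         if text[i] == '{' and text[i + 1] == '{':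
--             depth += 1
--             i += 2
--             continue
--         if text[i] == '}' and text[i + 1] == '}':
--             depth -= 1
--             i += 2
--             if depth <= 0:
--                 # Remove inclusive of end braces
--                 return text[:start] + text[i:]
--             continue
--         i += 1
--     # Fallback: if not properly closed, cut from start to end
--     return text[:start]
-- ===== SOURCE B (Python) =====
-- def _scan_tokens(text, i):
--     """Positions (end index, is_open) of every non-overlapping '{{' / '}}' token from i on."""
--     tokens = []
--     n = len(text)
--     while i < n - 1:
--         pair = text[i:i + 2]
--         if pair == '{{':
--             tokens.append((i + 2, True))
--             i += 2
--         elif pair == '}}':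
--             tokens.append((i + 2, False))
--             i += 2
--         else:
--             i += 1
--     return tokens
--
--
-- def remove_infobox_jutsu(text: str) -> str:
--     """Remove the full '{{Infobox/Jutsu ...}}' template with balanced braces.
--     Case-insensitive match on the template name.
--     Two phases: tokenize the brace tokens once, then balance over the token list.
--     """
--     start = text.lower().find("{{infobox/jutsu")
--     if start == -1:
--         return text
--     depth = 0
--     for end, is_open in _scan_tokens(text, start):
--         if is_open:
--             depth += 1
--         else:
--             depth -= 1
--             if depth <= 0:
--                 return text[:start] + text[end:]
--     return text[:start]
-- ===== Notes on version B (the rewrite author's own statement) =====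
-- stated objective: alternative
-- what changed: A's single fused character loop that scans and balances at once is split into two phases: first build the list of non-overlapping '{{'/'}}' token end-positions, then run the depth counter over that token list.
import Mathlib
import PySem

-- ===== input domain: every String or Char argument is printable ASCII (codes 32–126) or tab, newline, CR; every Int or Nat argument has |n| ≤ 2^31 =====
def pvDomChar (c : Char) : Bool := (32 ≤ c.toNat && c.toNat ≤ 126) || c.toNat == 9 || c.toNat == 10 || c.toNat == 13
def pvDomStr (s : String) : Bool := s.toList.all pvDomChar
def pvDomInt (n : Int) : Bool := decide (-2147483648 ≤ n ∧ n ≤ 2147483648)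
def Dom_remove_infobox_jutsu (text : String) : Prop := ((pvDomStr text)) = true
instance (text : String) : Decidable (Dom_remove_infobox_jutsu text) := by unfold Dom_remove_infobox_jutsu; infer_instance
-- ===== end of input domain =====

-- B replaces A's single fused scan-and-balance character loop by two phases — tokenize the
-- non-overlapping '{{'/'}}' tokens once, then run the depth counter over the token list
-- (objective: alternative decomposition; same cost).

-- ===== PORT A =====
-- A's fused while-loop: one char scan maintaining the depth and returning as soon as it closes.
-- text[:start] / text[i:] with the nonnegative Nat indices used here are exactly take/drop.
def pvLoopA (cs : List Char) (start : Nat) (i : Nat) (depth : Int) : List Char :=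
  if h : i < cs.length - 1 then
    if cs[i]? = some '{' ∧ cs[i+1]? = some '{' then
      pvLoopA cs start (i+2) (depth+1)
    else if cs[i]? = some '}' ∧ cs[i+1]? = some '}' then
      if depth - 1 ≤ 0 then cs.take start ++ cs.drop (i+2)
      else pvLoopA cs start (i+2) (depth-1)
    else pvLoopA cs start (i+1) depth
  else cs.take start
termination_by cs.length - i
decreasing_by all_goals omega

def remove_infobox_jutsu (text : String) : String :=
  let lower := PySem.Str.lower text
  let start := PySem.Str.find lower (PySem.Str.lower "{{Infobox/Jutsu")
  if start = -1 then text
  else String.ofList (pvLoopA text.toList start.toNat start.toNat 0)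

-- ===== PORT B =====
-- phase 1: token list — (end index, is_open) of each non-overlapping '{{' / '}}' from i on;
-- text[i:i+2] with nonnegative i is (cs.drop i).take 2.
def pvScanTokens (cs : List Char) (i : Nat) : List (Nat × Bool) :=
  if h : i < cs.length - 1 then
    let pair := (cs.drop i).take 2
    if pair = ['{', '{'] then (i+2, true) :: pvScanTokens cs (i+2)
    else if pair = ['}', '}'] then (i+2, false) :: pvScanTokens cs (i+2)
    else pvScanTokens cs (i+1)
  else []
termination_by cs.length - i
decreasing_by all_goals omega

-- phase 2: depth counter over the token list
def pvBalance (cs : List Char) (start : Nat) : Int → List (Nat × Bool) → List Char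
  | _, [] => cs.take start
  | depth, (e, isOpen) :: rest =>
    if isOpen then pvBalance cs start (depth+1) rest
    else if depth - 1 ≤ 0 then cs.take start ++ cs.drop e
    else pvBalance cs start (depth-1) rest

def remove_infobox_jutsu_alt (text : String) : String :=
  let start := PySem.Str.find (PySem.Str.lower text) "{{infobox/jutsu"
  if start = -1 then text
  else String.ofList (pvBalance text.toList start.toNat 0 (pvScanTokens text.toList start.toNat))

-- ===== PRECONDITION & SPEC =====
def Spec_remove_infobox_jutsu (text : String) (out : String) : Prop := out = remove_infobox_jutsu_alt text
instance (text : String) (out : String) : Decidable (Spec_remove_infobox_jutsu text out) := by unfold Spec_remove_infobox_jutsu; infer_instance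

-- ===== CLAIM (what is proved, stated in full; the proofs are below) =====
def Claim_equal_remove_infobox_jutsu : Prop := ∀ (text : String), Dom_remove_infobox_jutsu text → Spec_remove_infobox_jutsu text (remove_infobox_jutsu text)

-- ===== LEMMAS AND PROOFS =====

lemma take_two_drop (cs : List Char) (i : Nat) (h : i + 1 < cs.length) :
    (cs.drop i).take 2 = [cs[i], cs[i+1]] := by
  have e1 : cs.drop i = cs[i] :: cs.drop (i+1) := List.drop_eq_getElem_cons (by omega)
  have e2 : cs.drop (i+1) = cs[i+1] :: cs.drop (i+2) := List.drop_eq_getElem_cons h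
  rw [e1, e2]
  rfl

-- the fused loop of A equals: tokenize from i, then balance the token list
lemma loopA_eq_balance_scan (cs : List Char) (start i : Nat) (depth : Int) :
    pvLoopA cs start i depth = pvBalance cs start depth (pvScanTokens cs i) := by
  induction i, depth using pvLoopA.induct cs with
  | case1 i depth h hbr ih =>
      have hlen : i + 1 < cs.length := by omega
      have e1 : cs[i] = '{' := by
        have := hbr.1; rw [List.getElem?_eq_getElem (by omega)] at this
        exact Option.some_injective _ this
      have e2 : cs[i+1] = '{' := by
        have := hbr.2; rw [List.getElem?_eq_getElem hlen] at this
        exact Option.some_injective _ this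
      rw [pvLoopA, pvScanTokens, dif_pos h, dif_pos h, if_pos hbr]
      simp only [take_two_drop cs i hlen, e1, e2]
      rw [if_pos trivial]
      simpa [pvBalance] using ih
  | case2 i depth h hbr1 hbr2 hd =>
      have hlen : i + 1 < cs.length := by omega
      have e1 : cs[i] = '}' := by
        have := hbr2.1; rw [List.getElem?_eq_getElem (by omega)] at this
        exact Option.some_injective _ this
      have e2 : cs[i+1] = '}' := by
        have := hbr2.2; rw [List.getElem?_eq_getElem hlen] at this
        exact Option.some_injective _ this
      rw [pvLoopA, pvScanTokens, dif_pos h, dif_pos h,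
          if_neg hbr1, if_pos hbr2, if_pos hd]
      simp only [take_two_drop cs i hlen, e1, e2]
      rw [if_neg (by decide), if_pos trivial]
      simp [pvBalance, hd]
  | case3 i depth h hbr1 hbr2 hd ih =>
      have hlen : i + 1 < cs.length := by omega
      have e1 : cs[i] = '}' := by
        have := hbr2.1; rw [List.getElem?_eq_getElem (by omega)] at this
        exact Option.some_injective _ this
      have e2 : cs[i+1] = '}' := by
        have := hbr2.2; rw [List.getElem?_eq_getElem hlen] at this
        exact Option.some_injective _ this
      rw [pvLoopA, pvScanTokens, dif_pos h, dif_pos h,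
          if_neg hbr1, if_pos hbr2, if_neg hd]
      simp only [take_two_drop cs i hlen, e1, e2]
      rw [if_neg (by decide), if_pos trivial]
      simp only [pvBalance, Bool.false_eq_true, if_false, if_neg hd]
      exact ih
  | case4 i depth h hbr1 hbr2 ih =>
      have hlen : i + 1 < cs.length := by omega
      have h1 : cs[i]? = some cs[i] := List.getElem?_eq_getElem (by omega)
      have h2 : cs[i+1]? = some cs[i+1] := List.getElem?_eq_getElem hlen
      have hne1 : ¬ ([cs[i], cs[i+1]] = ['{', '{'] : Prop) := by
        intro hc
        injection hc with a b
        injection b with c _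
        exact hbr1 ⟨by rw [h1, a], by rw [h2, c]⟩
      have hne2 : ¬ ([cs[i], cs[i+1]] = ['}', '}'] : Prop) := by
        intro hc
        injection hc with a b
        injection b with c _
        exact hbr2 ⟨by rw [h1, a], by rw [h2, c]⟩
      rw [pvLoopA, pvScanTokens, dif_pos h, dif_pos h, if_neg hbr1, if_neg hbr2]
      simp only [take_two_drop cs i hlen]
      rw [if_neg hne1, if_neg hne2]
      exact ih
  | case5 i depth h =>
      rw [pvLoopA, pvScanTokens, dif_neg h, dif_neg h]
      rfl

-- ===== VERDICT (by name: the statement is the Claim_ definition above) =====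
theorem remove_infobox_jutsu_spec : Claim_equal_remove_infobox_jutsu := by
  intro text _
  have hlow : PySem.Str.lower "{{Infobox/Jutsu" = "{{infobox/jutsu" := by decide
  unfold Spec_remove_infobox_jutsu
  simp only [remove_infobox_jutsu, remove_infobox_jutsu_alt, hlow]
  split
  · rfl
  · rw [loopA_eq_balance_scan]
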